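-- pv_equiv track=rewrite | github.com/LE-428/Tantrix | main.py | categorize_puzzle
-- ===== SOURCE A (Python) =====
-- def categorize_puzzle(puzzle):
--     """Gibt die Kategorien der enthaltenen Steine an [ccc, clc, xl, xc]"""
--     out = [0 for _ in range(4)]
--     for tile in puzzle:
--         if tile in [7, 12, 21, 26, 35, 40, 49, 54]:  # ccc
--             out[0] += 1
--             continue
--         elif tile in [3, 9, 11, 17, 23, 25, 31, 37, 39, 45, 51, 53]:  # clc
--             out[1] += 1
--             continue
--         elif tile in [1, 8, 10, 15, 22, 24, 29, 36, 38, 43, 50, 52]:  # xl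
--             out[2] += 1
--             continue
--         else:  # xc
--             out[3] += 1
--     return tuple(out)
-- ===== SOURCE B (Python) =====
-- CCC = [7, 12, 21, 26, 35, 40, 49, 54]
-- CLC = [3, 9, 11, 17, 23, 25, 31, 37, 39, 45, 51, 53]
-- XL = [1, 8, 10, 15, 22, 24, 29, 36, 38, 43, 50, 52]
--
--
-- def categorize_puzzle(puzzle):
--     """Gibt die Kategorien der enthaltenen Steine an [ccc, clc, xl, xc]"""
--     freq = {}
--     for tile in puzzle:
--         freq[tile] = freq.get(tile, 0) + 1
--     ccc = sum(freq.get(t, 0) for t in CCC)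
--     clc = sum(freq.get(t, 0) for t in CLC)
--     xl = sum(freq.get(t, 0) for t in XL)
--     return (ccc, clc, xl, len(puzzle) - ccc - clc - xl)
-- ===== Notes on version B (the rewrite author's own statement) =====
-- stated objective: alternative
-- what changed: Replaces A's single branching pass (per-tile if/elif chain incrementing four counters) by a frequency-table-then-aggregate shape: build a dict of tile counts in one pass, then sum the counts over the three fixed category lists and get the default bucket as len(puzzle) minus the rest.
import Mathlib
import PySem

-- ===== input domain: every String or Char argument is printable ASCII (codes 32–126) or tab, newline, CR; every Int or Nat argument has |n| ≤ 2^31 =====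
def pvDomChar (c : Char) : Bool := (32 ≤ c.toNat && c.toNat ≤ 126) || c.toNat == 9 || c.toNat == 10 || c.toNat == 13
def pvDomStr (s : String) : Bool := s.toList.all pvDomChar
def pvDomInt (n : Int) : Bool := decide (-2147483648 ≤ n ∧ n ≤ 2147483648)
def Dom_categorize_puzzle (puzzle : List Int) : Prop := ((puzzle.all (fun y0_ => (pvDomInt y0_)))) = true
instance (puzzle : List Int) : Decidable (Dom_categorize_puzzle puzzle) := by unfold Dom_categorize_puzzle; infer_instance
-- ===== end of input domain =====

-- B replaces A's single branching pass by a frequency-table-then-aggregate decomposition; same cost class, no speed claim.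

-- ===== PORT A =====
-- A: one pass, if/elif chain on membership in the three literal category lists, four running counters.
def categorize_puzzle (puzzle : List Int) : Int × Int × Int × Int :=
  let out := puzzle.foldl
    (fun (o : Int × Int × Int × Int) tile =>
      if tile ∈ ([7, 12, 21, 26, 35, 40, 49, 54] : List Int) then
        (o.1 + 1, o.2.1, o.2.2.1, o.2.2.2)
      else if tile ∈ ([3, 9, 11, 17, 23, 25, 31, 37, 39, 45, 51, 53] : List Int) then
        (o.1, o.2.1 + 1, o.2.2.1, o.2.2.2)
      else if tile ∈ ([1, 8, 10, 15, 22, 24, 29, 36, 38, 43, 50, 52] : List Int) then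
        (o.1, o.2.1, o.2.2.1 + 1, o.2.2.2)
      else
        (o.1, o.2.1, o.2.2.1, o.2.2.2 + 1))
    (0, 0, 0, 0)
  out

-- ===== PORT B =====
def pvCCC : List Int := [7, 12, 21, 26, 35, 40, 49, 54]
def pvCLC : List Int := [3, 9, 11, 17, 23, 25, 31, 37, 39, 45, 51, 53]
def pvXL : List Int := [1, 8, 10, 15, 22, 24, 29, 36, 38, 43, 50, 52]

-- B: build the frequency dict in one pass, then sum the counts over the fixed category lists.
def categorize_puzzle_alt (puzzle : List Int) : Int × Int × Int × Int :=
  let freq : PySem.Dict Int Int :=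
    puzzle.foldl (fun d tile => d.insert tile (d.getD tile 0 + 1)) PySem.Dict.empty
  let ccc := (pvCCC.map (fun t => freq.getD t 0)).sum
  let clc := (pvCLC.map (fun t => freq.getD t 0)).sum
  let xl := (pvXL.map (fun t => freq.getD t 0)).sum
  (ccc, clc, xl, (puzzle.length : Int) - ccc - clc - xl)

-- ===== PRECONDITION & SPEC =====
def Spec_categorize_puzzle (puzzle : List Int) (out : Int × Int × Int × Int) : Prop := out = categorize_puzzle_alt puzzle
instance (puzzle : List Int) (out : Int × Int × Int × Int) : Decidable (Spec_categorize_puzzle puzzle out) := by unfold Spec_categorize_puzzle; infer_instance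

-- ===== CLAIM (what is proved, stated in full; the proofs are below) =====
def Claim_equal_categorize_puzzle : Prop := ∀ (puzzle : List Int), Dom_categorize_puzzle puzzle → Spec_categorize_puzzle puzzle (categorize_puzzle puzzle)

-- ===== LEMMAS AND PROOFS =====

-- sum of counts over a category list, as Int
def pvS (ts : List Int) (l : List Int) : Int := (ts.map (fun t => (l.count t : Int))).sum

theorem pvS_cons (ts : List Int) (x : Int) (l : List Int) :
    pvS ts (x :: l) = pvS ts l + ((ts.count x : Nat) : Int) := by
  induction ts with
  | nil => simp [pvS]
  | cons t ts ih =>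
    simp only [pvS, List.map_cons, List.sum_cons, List.count_cons] at *
    rw [ih]
    by_cases h : t = x
    · simp [h, eq_comm]
      push_cast
      ring
    · have h' : ¬ (x = t) := fun hh => h hh.symm
      simp [h, h']
      push_cast
      ring

theorem foldA_eq (l : List Int) (a b c d : Int) :
    l.foldl
      (fun (o : Int × Int × Int × Int) tile =>
        if tile ∈ ([7, 12, 21, 26, 35, 40, 49, 54] : List Int) then
          (o.1 + 1, o.2.1, o.2.2.1, o.2.2.2)
        else if tile ∈ ([3, 9, 11, 17, 23, 25, 31, 37, 39, 45, 51, 53] : List Int) then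
          (o.1, o.2.1 + 1, o.2.2.1, o.2.2.2)
        else if tile ∈ ([1, 8, 10, 15, 22, 24, 29, 36, 38, 43, 50, 52] : List Int) then
          (o.1, o.2.1, o.2.2.1 + 1, o.2.2.2)
        else
          (o.1, o.2.1, o.2.2.1, o.2.2.2 + 1))
      (a, b, c, d)
    = (a + pvS pvCCC l, b + pvS pvCLC l, c + pvS pvXL l,
       d + ((l.length : Int) - pvS pvCCC l - pvS pvCLC l - pvS pvXL l)) := by
  induction l generalizing a b c d with
  | nil => simp [pvS]
  | cons x l ih =>
    simp only [List.foldl_cons]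
    by_cases h0 : x ∈ ([7, 12, 21, 26, 35, 40, 49, 54] : List Int)
    · rw [if_pos h0, ih]
      have hc : ((pvCCC.count x : Nat) : Int) = 1 ∧ ((pvCLC.count x : Nat) : Int) = 0 ∧
          ((pvXL.count x : Nat) : Int) = 0 := by
        fin_cases h0 <;> decide
      simp only [pvS_cons, List.length_cons, hc.1, hc.2.1, hc.2.2]
      push_cast; refine Prod.ext ?_ (Prod.ext ?_ (Prod.ext ?_ ?_)) <;> simp <;> ring
    · rw [if_neg h0]
      by_cases h1 : x ∈ ([3, 9, 11, 17, 23, 25, 31, 37, 39, 45, 51, 53] : List Int)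
      · rw [if_pos h1, ih]
        have hc : ((pvCCC.count x : Nat) : Int) = 0 ∧ ((pvCLC.count x : Nat) : Int) = 1 ∧
            ((pvXL.count x : Nat) : Int) = 0 := by
          fin_cases h1 <;> decide
        simp only [pvS_cons, List.length_cons, hc.1, hc.2.1, hc.2.2]
        push_cast; refine Prod.ext ?_ (Prod.ext ?_ (Prod.ext ?_ ?_)) <;> simp <;> ring
      · rw [if_neg h1]
        by_cases h2 : x ∈ ([1, 8, 10, 15, 22, 24, 29, 36, 38, 43, 50, 52] : List Int)
        · rw [if_pos h2, ih]
          have hc : ((pvCCC.count x : Nat) : Int) = 0 ∧ ((pvCLC.count x : Nat) : Int) = 0 ∧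
              ((pvXL.count x : Nat) : Int) = 1 := by
            fin_cases h2 <;> decide
          simp only [pvS_cons, List.length_cons, hc.1, hc.2.1, hc.2.2]
          push_cast; refine Prod.ext ?_ (Prod.ext ?_ (Prod.ext ?_ ?_)) <;> simp <;> ring
        · rw [if_neg h2, ih]
          have hc : ((pvCCC.count x : Nat) : Int) = 0 ∧ ((pvCLC.count x : Nat) : Int) = 0 ∧
              ((pvXL.count x : Nat) : Int) = 0 := by
            refine ⟨?_, ?_, ?_⟩ <;>
              · simp only [Int.natCast_eq_zero, List.count_eq_zero]
                intro hmem
                first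
                | exact h0 (by revert hmem; unfold pvCCC; intro hmem; exact hmem)
                | exact h1 (by revert hmem; unfold pvCLC; intro hmem; exact hmem)
                | exact h2 (by revert hmem; unfold pvXL; intro hmem; exact hmem)
          simp only [pvS_cons, List.length_cons, hc.1, hc.2.1, hc.2.2]
          push_cast; refine Prod.ext ?_ (Prod.ext ?_ (Prod.ext ?_ ?_)) <;> simp <;> ring

theorem altB_eq (puzzle : List Int) :
    categorize_puzzle_alt puzzle
    = (pvS pvCCC puzzle, pvS pvCLC puzzle, pvS pvXL puzzle,
       (puzzle.length : Int) - pvS pvCCC puzzle - pvS pvCLC puzzle - pvS pvXL puzzle) := by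
  unfold categorize_puzzle_alt
  have hget : ∀ t : Int,
      ((puzzle.foldl (fun d tile => d.insert tile (d.getD tile 0 + 1))
        (PySem.Dict.empty : PySem.Dict Int Int)).getD t 0) = (puzzle.count t : Int) := by
    intro t
    rw [PySem.Dict.getD_foldl_insert_add_one]
    simp [PySem.Dict.getD_empty]
  simp only [pvS, hget]

-- ===== VERDICT (by name: the statement is the Claim_ definition above) =====
theorem categorize_puzzle_spec : Claim_equal_categorize_puzzle := by
  intro puzzle _
  unfold Spec_categorize_puzzle categorize_puzzle
  rw [altB_eq, foldA_eq]
  simp
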